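-- pv_equiv track=rewrite | github.com/edgar-ramxs/RecSysUnab | models/utils/transformation.py | create_exercise_list
-- ===== SOURCE A (Python) =====
-- from typing import Dict, List, Optional, Text, Tuple
--
-- def create_exercise_list(n_items: int, items: List[int]) -> List[int]:
--     """Crea una lista binaria que indica si un ejercicio fue realizado o no.
--
--     Args:
--         n_items (int): Número total de ejercicios.
--         items (List[int]): Lista de ejercicios realizados.
--
--     Returns:
--         List[int]: Lista binaria de tamaño n_items.
--     """
--     item_list = [0] * n_items
--     for item in items:
--         if (
--             0 <= item < n_items
--         ):  # Validar que el ejercicio esté en el rango permitido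
--             item_list[item] = 1
--     return item_list
-- ===== SOURCE B (Python) =====
-- def create_exercise_list(n_items, items):
--     done = set(items)
--     return [1 if i in done else 0 for i in range(n_items)]
-- ===== Notes on version B (the rewrite author's own statement) =====
-- stated objective: idiomatic
-- what changed: B scans every output position of range(n_items) testing membership in set(items) instead of scattering writes into a preallocated list indexed by items; the range iteration subsumes A's 0 <= item < n_items guard.
import Mathlib
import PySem

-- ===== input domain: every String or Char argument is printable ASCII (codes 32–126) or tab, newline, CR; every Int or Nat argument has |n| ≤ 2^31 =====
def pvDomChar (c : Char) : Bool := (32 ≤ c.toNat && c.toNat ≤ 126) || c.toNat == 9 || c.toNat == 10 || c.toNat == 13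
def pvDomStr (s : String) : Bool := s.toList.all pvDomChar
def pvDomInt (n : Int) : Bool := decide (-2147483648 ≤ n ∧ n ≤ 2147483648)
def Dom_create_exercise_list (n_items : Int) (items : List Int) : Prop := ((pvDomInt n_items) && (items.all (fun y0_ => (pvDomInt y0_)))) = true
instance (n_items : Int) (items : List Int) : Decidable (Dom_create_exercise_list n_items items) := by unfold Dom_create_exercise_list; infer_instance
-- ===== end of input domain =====

-- B marks positions by scanning range(n_items) with a membership test in set(items)
-- instead of A's scatter-writes indexed by items (idiomatic; same cost).

-- ===== PORT A =====
def create_exercise_list (n_items : Int) (items : List Int) : List Int :=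
  items.foldl
    (fun item_list item =>
      if 0 ≤ item ∧ item < n_items then PySem.List.pySetD item_list item 1 else item_list)
    (List.replicate n_items.toNat 0)

-- ===== PORT B =====
def create_exercise_list_alt (n_items : Int) (items : List Int) : List Int :=
  let done : PySem.Set Int := PySem.Set.ofList items
  (PySem.List.pyRange 0 n_items 1).map (fun i => if PySem.Set.contains done i then 1 else 0)

-- ===== PRECONDITION & SPEC =====
def Spec_create_exercise_list (n_items : Int) (items : List Int) (out : List Int) : Prop := out = create_exercise_list_alt n_items items
instance (n_items : Int) (items : List Int) (out : List Int) : Decidable (Spec_create_exercise_list n_items items out) := by unfold Spec_create_exercise_list; infer_instance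

-- ===== CLAIM (what is proved, stated in full; the proofs are below) =====
def Claim_equal_create_exercise_list : Prop := ∀ (n_items : Int) (items : List Int), Dom_create_exercise_list n_items items → Spec_create_exercise_list n_items items (create_exercise_list n_items items)

-- ===== LEMMAS AND PROOFS =====

theorem cel_foldl_length (n : Int) (items : List Int) (acc : List Int) :
    (items.foldl
      (fun item_list item =>
        if 0 ≤ item ∧ item < n then PySem.List.pySetD item_list item 1 else item_list)
      acc).length = acc.length := by
  induction items generalizing acc with
  | nil => rfl
  | cons it rest ih =>
      simp only [List.foldl_cons]
      rw [ih]
      split_ifs with h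
      · simp [PySem.List.length_pySetD]
      · rfl

theorem cel_foldl_getElem? (n : Int) (items : List Int) (acc : List Int) (k : Nat)
    (hlen : acc.length = n.toNat) (hk : k < n.toNat) :
    (items.foldl
      (fun item_list item =>
        if 0 ≤ item ∧ item < n then PySem.List.pySetD item_list item 1 else item_list)
      acc)[k]? = if (k : Int) ∈ items then some 1 else acc[k]? := by
  induction items generalizing acc with
  | nil => simp
  | cons it rest ih =>
      simp only [List.foldl_cons, List.mem_cons]
      by_cases hik : it = (k : Int)
      · subst hik
        have hguard : 0 ≤ ((k : Nat) : Int) ∧ ((k : Nat) : Int) < n := by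
          refine ⟨Int.natCast_nonneg k, by omega⟩
        rw [if_pos hguard, PySem.List.pySetD_natCast]
        have hlen' : (acc.set k 1).length = n.toNat := by simp [hlen]
        rw [ih _ hlen']
        have hkl : k < acc.length := by omega
        by_cases hm : (k : Int) ∈ rest
        · simp [hm]
        · simp [hm, hkl]
      · have hstep : (if 0 ≤ it ∧ it < n then PySem.List.pySetD acc it 1 else acc)[k]? = acc[k]? ∧
            (if 0 ≤ it ∧ it < n then PySem.List.pySetD acc it 1 else acc).length = n.toNat := by
          split_ifs with h
          · have hit2 : it = ((it.toNat : Nat) : Int) := by omega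
            rw [hit2, PySem.List.pySetD_natCast]
            refine ⟨?_, by simp [hlen]⟩
            apply List.getElem?_set_ne
            omega
          · exact ⟨rfl, hlen⟩
        rw [ih _ hstep.2, hstep.1]
        by_cases hm : (k : Int) ∈ rest
        · simp [hm]
        · have hno : ¬((k : Int) = it ∨ (k : Int) ∈ rest) := by
            rintro (hc | hc)
            · exact hik hc.symm
            · exact hm hc
          rw [if_neg hm, if_neg hno]

-- ===== VERDICT (by name: the statement is the Claim_ definition above) =====
theorem create_exercise_list_spec : Claim_equal_create_exercise_list := by
  intro n items _
  unfold Spec_create_exercise_list create_exercise_list create_exercise_list_alt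
  dsimp only
  apply List.ext_getElem?
  intro k
  by_cases hk : k < n.toNat
  · rw [cel_foldl_getElem? n items _ k (by simp) hk]
    rw [show n = ((n.toNat : Nat) : Int) from by omega]
    rw [PySem.List.getElem?_map_pyRange_zero _ n.toNat k hk]
    by_cases hm : (k : Int) ∈ items
    · simp [PySem.Set.contains, hm]
    · simp [PySem.Set.contains, hm, List.getElem?_replicate]
      omega
  · have h1 : (items.foldl
        (fun item_list item =>
          if 0 ≤ item ∧ item < n then PySem.List.pySetD item_list item 1 else item_list)
        (List.replicate n.toNat (0 : Int))).length ≤ k := by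
      refine (cel_foldl_length n items (List.replicate n.toNat (0 : Int))).trans_le ?_
      simp
      omega
    have h2 : ((PySem.List.pyRange 0 n 1).map
        (fun i => if PySem.Set.contains (PySem.Set.ofList items) i then (1 : Int) else 0)).length ≤ k := by
      rw [List.length_map, PySem.List.length_pyRange_one]
      omega
    exact (List.getElem?_eq_none h1).trans (List.getElem?_eq_none h2).symm
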